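-- pv_equiv track=rewrite | github.com/trushad0w/clickhouse-migrate | clickhouse_migrate/interfaces/service.py | is_on_cluster
-- ===== SOURCE A (Python) =====
-- def is_on_cluster(sql: str) -> bool:
--     """
--     Check if current sql query contains 'ON CLUSTER' keyword
--     :param sql: query to check
--     :returns: boolean
--     """
--     last_on_idx = -2
--     for idx, item in enumerate(sql.split()):
--         if item.lower() == "on":
--             last_on_idx = idx
--         if item.lower() == "cluster" and last_on_idx + 1 == idx:
--             return True
--
--     return False
-- ===== SOURCE B (Python) =====
-- def is_on_cluster(sql: str) -> bool:
--     """
--     Check if current sql query contains 'ON CLUSTER' keyword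
--     :param sql: query to check
--     :returns: boolean
--     """
--     words = [w.lower() for w in sql.split()]
--     ons = {i + 1 for i, w in enumerate(words) if w == "on"}
--     clusters = {i for i, w in enumerate(words) if w == "cluster"}
--     return not ons.isdisjoint(clusters)
-- ===== Notes on version B (the rewrite author's own statement) =====
-- stated objective: alternative
-- what changed: Replaces the stateful single scan (which stores the index of the most recent ON keyword) with staged passes: lowercase all words, build the set of positions immediately after an ON token and the set of positions of CLUSTER tokens, then report whether the two index sets intersect.
import Mathlib
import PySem

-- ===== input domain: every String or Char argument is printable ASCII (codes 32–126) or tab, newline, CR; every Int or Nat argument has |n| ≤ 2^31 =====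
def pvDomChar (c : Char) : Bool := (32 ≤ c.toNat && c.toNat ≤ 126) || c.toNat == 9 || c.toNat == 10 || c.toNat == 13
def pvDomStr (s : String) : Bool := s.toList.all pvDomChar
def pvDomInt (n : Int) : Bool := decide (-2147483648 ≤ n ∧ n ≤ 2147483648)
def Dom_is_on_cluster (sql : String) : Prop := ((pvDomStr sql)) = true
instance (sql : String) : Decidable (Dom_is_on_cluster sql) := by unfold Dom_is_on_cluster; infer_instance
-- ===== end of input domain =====

-- B replaces A's stateful indexed scan with staged passes: lowercase the words, collect the index set after each ON token and the index set of CLUSTER tokens, and test the two sets for intersection (alternative decomposition, same cost).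


-- ===== PORT A =====
-- the 'for idx, item in enumerate(sql.split())' loop with early return, carrying last_on_idx
def isOnClusterLoop (last : Int) : List (Int × String) → Bool
  | [] => false
  | (idx, item) :: rest =>
    let last := if PySem.Str.lower item == "on" then idx else last
    if PySem.Str.lower item == "cluster" && last + 1 == idx then true
    else isOnClusterLoop last rest

def is_on_cluster (sql : String) : Bool :=
  isOnClusterLoop (-2) (PySem.List.enumerate (PySem.Str.split₀ sql) 0)

-- ===== PORT B =====
def is_on_cluster_alt (sql : String) : Bool :=
  let words := (PySem.Str.split₀ sql).map PySem.Str.lower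
  let ons : PySem.Set Int := PySem.Set.ofList
    ((PySem.List.enumerate words 0).filterMap (fun p => if p.2 == "on" then some (p.1 + 1) else none))
  let clusters : PySem.Set Int := PySem.Set.ofList
    ((PySem.List.enumerate words 0).filterMap (fun p => if p.2 == "cluster" then some p.1 else none))
  ! PySem.Set.isdisjoint ons clusters

-- ===== PRECONDITION & SPEC =====
def Spec_is_on_cluster (sql : String) (out : Bool) : Prop := out = is_on_cluster_alt sql
instance (sql : String) (out : Bool) : Decidable (Spec_is_on_cluster sql out) := by unfold Spec_is_on_cluster; infer_instance

-- ===== CLAIM (what is proved, stated in full; the proofs are below) =====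
def Claim_equal_is_on_cluster : Prop := ∀ (sql : String), Dom_is_on_cluster sql → Spec_is_on_cluster sql (is_on_cluster sql)

-- ===== LEMMAS AND PROOFS =====

-- 'previous word lowered to "on"' as the single bit of state A's loop reduces to
def pairScan (prev : Bool) : List String → Bool
  | [] => false
  | w :: rest =>
    (prev && (PySem.Str.lower w == "cluster")) || pairScan (PySem.Str.lower w == "on") rest

lemma loopA_eq_pairScan (ws : List String) : ∀ (i last : Int), last < i →
    isOnClusterLoop last (PySem.List.enumerate ws i) = pairScan (decide (last + 1 = i)) ws := by
  induction ws with
  | nil => intro i last _; simp [PySem.List.enumerate_nil, isOnClusterLoop, pairScan]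
  | cons w rest ih =>
    intro i last hlt
    rw [PySem.List.enumerate_cons]
    simp only [isOnClusterLoop, pairScan]
    by_cases hon : PySem.Str.lower w == "on"
    · have hcl : (PySem.Str.lower w == "cluster") = false := by
        cases h : PySem.Str.lower w == "cluster" <;> simp_all
      have hii : (i + 1 == i) = false := by simp
      simp only [hon, hcl, hii, Bool.and_false, if_true]
      rw [ih (i+1) i (by omega)]
      simp
    · simp only [Bool.not_eq_true] at hon
      simp only [hon, if_false, Bool.false_eq_true]
      by_cases hhit : (PySem.Str.lower w == "cluster" && last + 1 == i) = true
      · rw [if_pos hhit]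
        have h1 : (PySem.Str.lower w == "cluster") = true := by
          cases h : PySem.Str.lower w == "cluster" <;> simp_all
        have h2 : last + 1 = i := by
          have := hhit; simp [h1] at this; omega
        simp [h1, h2]
      · rw [if_neg hhit]
        rw [ih (i+1) last (by omega)]
        have hne : (decide (last + 1 = i + 1)) = false := by simp; omega
        rw [hne]
        by_cases hprev : last + 1 = i
        · have h1 : (PySem.Str.lower w == "cluster") = false := by
            cases h : PySem.Str.lower w == "cluster"
            · rfl
            · exfalso; apply hhit; simp [h, hprev]
          simp [hprev, h1]
        · simp [hprev]

-- the adjacency property both sides reduce to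
def AdjP (ws : List String) : Prop :=
  ∃ k : Nat, ∃ h : k + 1 < ws.length,
    PySem.Str.lower (ws[k]'(by omega)) = "on" ∧ PySem.Str.lower (ws[k+1]'h) = "cluster"

lemma pairScan_false_iff (ws : List String) :
    ∀ prev : Bool, (pairScan prev ws = true ↔
      ((prev = true ∧ ∃ h : 0 < ws.length, PySem.Str.lower (ws[0]'h) = "cluster") ∨ AdjP ws)) := by
  induction ws with
  | nil =>
    intro prev
    simp [pairScan, AdjP]
  | cons w rest ih =>
    intro prev
    simp only [pairScan, Bool.or_eq_true, Bool.and_eq_true, beq_iff_eq]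
    rw [ih]
    constructor
    · rintro (⟨hp, hc⟩ | ⟨hon, h0, hc⟩ | ⟨k, hk, h1, h2⟩)
      · exact Or.inl ⟨hp, by simp, by simpa using hc⟩
      · refine Or.inr ⟨0, by simpa using h0, by simpa using hon, by simpa using hc⟩
      · exact Or.inr ⟨k+1, by simp only [List.length_cons]; omega, by simpa using h1, by simpa using h2⟩
    · rintro (⟨hp, _, hc⟩ | ⟨k, hk, h1, h2⟩)
      · exact Or.inl ⟨hp, by simpa using hc⟩
      · cases k with
        | zero =>
          exact Or.inr (Or.inl ⟨by simpa using h1, by simp only [List.length_cons] at hk; omega, by simpa using h2⟩)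
        | succ k' =>
          exact Or.inr (Or.inr ⟨k', by simp only [List.length_cons] at hk; omega, by simpa using h1, by simpa using h2⟩)

-- membership in one of B's index sets, before dedup
lemma mem_marks (ws : List String) (t : String) (off : Int) (x : Int) :
    (x ∈ (PySem.List.enumerate ws 0).filterMap
        (fun p => if p.2 == t then some (p.1 + off) else none)) ↔
      ∃ k : Nat, ∃ _ : k < ws.length, ws[k] = t ∧ x = (k : Int) + off := by
  rw [List.mem_filterMap]
  constructor
  · rintro ⟨p, hp, hpe⟩
    rw [PySem.List.mem_enumerate_iff] at hp
    obtain ⟨k, hk, rfl⟩ := hp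
    simp only [beq_iff_eq] at hpe
    split_ifs at hpe with h
    · simp only [Option.some_inj] at hpe
      exact ⟨k, hk, h, by omega⟩
  · rintro ⟨k, hk, ht, rfl⟩
    refine ⟨((k : Int), ws[k]), ?_, ?_⟩
    · rw [PySem.List.mem_enumerate_iff]
      exact ⟨k, hk, by simp⟩
    · simp [ht]

-- same, for the offset-free 'cluster' index set
lemma mem_marks0 (ws : List String) (t : String) (x : Int) :
    (x ∈ (PySem.List.enumerate ws 0).filterMap
        (fun p => if p.2 == t then some p.1 else none)) ↔
      ∃ k : Nat, ∃ _ : k < ws.length, ws[k] = t ∧ x = (k : Int) := by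
  rw [List.mem_filterMap]
  constructor
  · rintro ⟨p, hp, hpe⟩
    rw [PySem.List.mem_enumerate_iff] at hp
    obtain ⟨k, hk, rfl⟩ := hp
    simp only [beq_iff_eq] at hpe
    split_ifs at hpe with h
    simp only [Option.some_inj] at hpe
    exact ⟨k, hk, h, by omega⟩
  · rintro ⟨k, hk, ht, rfl⟩
    refine ⟨((k : Int), ws[k]), ?_, ?_⟩
    · rw [PySem.List.mem_enumerate_iff]
      exact ⟨k, hk, by simp⟩
    · simp [ht]

lemma altB_iff (sql : String) :
    is_on_cluster_alt sql = true ↔ AdjP (PySem.Str.split₀ sql) := by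
  unfold is_on_cluster_alt
  rw [Bool.not_eq_true', Bool.eq_false_iff, Ne, PySem.Set.isdisjoint_iff]
  push Not
  constructor
  · rintro ⟨x, hx, hx'⟩
    rw [PySem.Set.mem_ofList, mem_marks] at hx
    rw [PySem.Set.mem_ofList, mem_marks0] at hx'
    obtain ⟨k, hk, h1, rfl⟩ := hx
    obtain ⟨j, hj, h2, hkj⟩ := hx'
    have hjk : j = k + 1 := by omega
    subst hjk
    rw [List.getElem_map] at h1 h2
    exact ⟨k, by simpa using hj, h1, h2⟩
  · rintro ⟨k, hk, h1, h2⟩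
    refine ⟨(k : Int) + 1, ?_, ?_⟩
    · rw [PySem.Set.mem_ofList, mem_marks]
      exact ⟨k, by simp only [List.length_map]; omega, by simpa using h1, rfl⟩
    · rw [PySem.Set.mem_ofList, mem_marks0]
      exact ⟨k + 1, by simpa using hk, by simpa using h2, by omega⟩

-- ===== VERDICT (by name: the statement is the Claim_ definition above) =====
theorem is_on_cluster_spec : Claim_equal_is_on_cluster := by
  intro sql _
  unfold Spec_is_on_cluster
  rw [Bool.eq_iff_iff]
  unfold is_on_cluster
  rw [loopA_eq_pairScan _ 0 (-2) (by omega)]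
  have h0 : (decide ((-2 : Int) + 1 = 0)) = false := by decide
  rw [h0, pairScan_false_iff, altB_iff]
  simp
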